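-- pv_equiv track=rewrite | github.com/okube-ai/laktory | docs/gen_api_docs.py | _primary_class
-- ===== SOURCE A (Python) =====
-- def _primary_class(classes: list[str], stem: str) -> str | None:
--     """The class whose name most closely matches the file stem."""
--     stem_lower = stem.lower().replace("_", "")
--     for cls in classes:
--         if cls.lower() == stem_lower:
--             return cls
--     for cls in classes:
--         if stem_lower in cls.lower():
--             return cls
--     return classes[0] if classes else None
-- ===== SOURCE B (Python) =====
-- def _primary_class(classes: list[str], stem: str) -> str | None:
--     """The class whose name most closely matches the file stem."""
--     stem_lower = stem.lower().replace("_", "")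
--
--     def rank(cls):
--         cl = cls.lower()
--         if cl == stem_lower:
--             return 0
--         if stem_lower in cl:
--             return 1
--         return 2
--
--     if not classes:
--         return None
--     return min(enumerate(classes), key=lambda p: (rank(p[1]), p[0]))[1]
-- ===== Notes on version B (the rewrite author's own statement) =====
-- stated objective: alternative
-- what changed: A's two staged scans plus head fallback are replaced by a single argmin: each class gets a rank (0 exact, 1 substring, 2 otherwise) and min over enumerate(classes) by (rank, index) selects the answer.
import Mathlib
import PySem

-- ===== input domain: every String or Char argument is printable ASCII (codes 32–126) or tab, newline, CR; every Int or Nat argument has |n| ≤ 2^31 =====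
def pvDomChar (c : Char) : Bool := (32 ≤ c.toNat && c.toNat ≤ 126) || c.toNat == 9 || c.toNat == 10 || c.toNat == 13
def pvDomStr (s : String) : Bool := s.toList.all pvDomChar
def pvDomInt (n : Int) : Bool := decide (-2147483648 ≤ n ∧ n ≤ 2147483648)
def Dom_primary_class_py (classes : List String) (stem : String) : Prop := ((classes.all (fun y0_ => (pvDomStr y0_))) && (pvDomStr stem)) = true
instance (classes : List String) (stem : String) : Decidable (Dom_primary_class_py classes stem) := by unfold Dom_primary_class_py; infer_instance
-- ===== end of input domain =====

-- B replaces A's two staged scans + head fallback by a single argmin over enumerate(classes)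
-- with key (rank, index), rank = 0 exact / 1 substring / 2 otherwise (objective: alternative).

-- ===== PORT A =====
-- first loop: return cls when cls.lower() == stem_lower
def pvA_loop1 (sl : String) : List String → Option String
  | [] => none
  | c :: rest => if PySem.Str.lower c == sl then some c else pvA_loop1 sl rest

-- second loop: return cls when stem_lower in cls.lower()
def pvA_loop2 (sl : String) : List String → Option String
  | [] => none
  | c :: rest => if PySem.Str.isIn sl (PySem.Str.lower c) then some c else pvA_loop2 sl rest

def primary_class_py (classes : List String) (stem : String) : Option String :=
  let stem_lower := PySem.Str.replace (PySem.Str.lower stem) "_" ""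
  match pvA_loop1 stem_lower classes with
  | some c => some c
  | none =>
    match pvA_loop2 stem_lower classes with
    | some c => some c
    | none => match classes with
              | [] => none
              | c :: _ => some c

-- ===== PORT B =====
-- rank(cls): 0 on exact match, 1 on substring match, 2 otherwise
def pvRank (sl cls : String) : Int :=
  let cl := PySem.Str.lower cls
  if cl == sl then 0 else if PySem.Str.isIn sl cl then 1 else 2

-- min(enumerate(classes), key=lambda p: (rank(p[1]), p[0]))[1]
def primary_class_py_alt (classes : List String) (stem : String) : Option String :=
  let stem_lower := PySem.Str.replace (PySem.Str.lower stem) "_" ""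
  match classes with
  | [] => none
  | _ :: _ =>
    (PySem.List.min2? (PySem.List.enumerate classes)
        (fun p => pvRank stem_lower p.2) (fun p => p.1)).map (fun p => p.2)

-- ===== PRECONDITION & SPEC =====
def Spec_primary_class_py (classes : List String) (stem : String) (out : Option String) : Prop := out = primary_class_py_alt classes stem
instance (classes : List String) (stem : String) (out : Option String) : Decidable (Spec_primary_class_py classes stem out) := by unfold Spec_primary_class_py; infer_instance

-- ===== CLAIM (what is proved, stated in full; the proofs are below) =====
def Claim_equal_primary_class_py : Prop := ∀ (classes : List String) (stem : String), Dom_primary_class_py classes stem → Spec_primary_class_py classes stem (primary_class_py classes stem)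

-- ===== LEMMAS AND PROOFS =====

-- the tie-free shape of B's argmin: keep the current minimum m, replace only on strictly smaller rank
def pvSel (sl : String) (m : String) : List String → String
  | [] => m
  | c :: rest => if pvRank sl c < pvRank sl m then pvSel sl c rest else pvSel sl m rest

-- the step function of min2?'s fold, specialised to key (rank, index)
def pvStep (sl : String) (acc : Option (Int × String)) (x : Int × String) : Option (Int × String) :=
  match acc with
  | none => some x
  | some m =>
    if (decide (pvRank sl x.2 < pvRank sl m.2) ||
        !decide (pvRank sl m.2 < pvRank sl x.2) && decide (x.1 < m.1)) = true
    then some x else some m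

-- since enumerate's indices strictly increase, min2?'s fold never replaces on equal ranks
theorem pvFold_enum (sl : String) (l : List String) :
    ∀ (i : Int) (m : Int × String), m.1 < i →
    ∃ j, List.foldl (pvStep sl) (some m) (PySem.List.enumerate l i) = some (j, pvSel sl m.2 l) := by
  induction l with
  | nil => intro i m hm; exact ⟨m.1, by simp [PySem.List.enumerate, pvSel]⟩
  | cons c rest ih =>
    intro i m hm
    rw [PySem.List.enumerate_cons]
    simp only [List.foldl_cons]
    by_cases h : pvRank sl c < pvRank sl m.2
    · have hstep : ¬ pvRank sl m.2 < pvRank sl c := by omega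
      obtain ⟨j, hj⟩ := ih (i + 1) (i, c) (by omega)
      exact ⟨j, by simpa [pvStep, h, hstep, pvSel] using hj⟩
    · by_cases h2 : pvRank sl m.2 < pvRank sl c
      · obtain ⟨j, hj⟩ := ih (i + 1) m (by omega)
        exact ⟨j, by simpa [pvStep, h, h2, pvSel] using hj⟩
      · have hi : ¬ ((i : Int) < m.1) := by omega
        obtain ⟨j, hj⟩ := ih (i + 1) m (by omega)
        exact ⟨j, by simpa [pvStep, h, h2, hi, pvSel] using hj⟩

theorem pvB_eq_sel (sl : String) (c : String) (rest : List String) :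
    (PySem.List.min2? (PySem.List.enumerate (c :: rest))
        (fun p => pvRank sl p.2) (fun p => p.1)).map (fun p => p.2)
      = some (pvSel sl c rest) := by
  obtain ⟨j, hj⟩ := pvFold_enum sl rest 1 (0, c) (by norm_num)
  unfold PySem.List.min2?
  rw [List.foldl_ext _ (pvStep sl) _ (fun a b _ => by cases a <;> rfl)]
  rw [show PySem.List.enumerate (c :: rest) = ((0 : Int), c) :: PySem.List.enumerate rest 1 from
    PySem.List.enumerate_cons ..]
  rw [List.foldl_cons]
  rw [show pvStep sl none ((0 : Int), c) = some ((0 : Int), c) from rfl]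
  rw [hj]
  rfl

theorem pvRank_nonneg (sl c : String) : 0 ≤ pvRank sl c := by
  simp only [pvRank]; split_ifs <;> norm_num

theorem pvRank_eq_zero_iff (sl c : String) : pvRank sl c = 0 ↔ (PySem.Str.lower c == sl) = true := by
  simp only [pvRank]
  split_ifs with h1 h2
  · exact iff_of_true rfl h1
  · exact iff_of_false (by norm_num) h1
  · exact iff_of_false (by norm_num) h1

theorem pvRank_le_two (sl c : String) : pvRank sl c ≤ 2 := by
  simp only [pvRank]; split_ifs <;> norm_num

theorem pvRank_le_one_iff (sl c : String) :
    pvRank sl c ≤ 1 ↔ PySem.Chars.isIn sl.toList (PySem.Chars.lower c.toList) = true := by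
  simp only [pvRank]
  split_ifs with h1 h2
  · have h3 : PySem.Str.lower c = sl := eq_of_beq h1
    refine iff_of_true (by norm_num) ?_
    have h4 : PySem.Str.isIn sl (PySem.Str.lower c) = true :=
      h3 ▸ (PySem.Str.isIn_iff_infix _ _).mpr (List.infix_refl _)
    simpa using h4
  · exact iff_of_true le_rfl (by simpa using h2)
  · exact iff_of_false (by norm_num) (by simpa using h2)

-- pvSel starting from m finds: m if rank 0; else first rank-0 of l; else m if rank ≤ 1; else first rank-≤1 of l; else m
theorem pvSel_char (sl : String) : ∀ (l : List String) (m : String),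
    pvSel sl m l =
      if pvRank sl m = 0 then m
      else match pvA_loop1 sl l with
        | some c => c
        | none =>
          if pvRank sl m ≤ 1 then m
          else match pvA_loop2 sl l with
               | some c => c
               | none => m := by
  intro l
  induction l with
  | nil => intro m; simp [pvSel, pvA_loop1, pvA_loop2]
  | cons c rest ih =>
    intro m
    have h0 := pvRank_eq_zero_iff sl c
    have h1 := pvRank_le_one_iff sl c
    have hnc := pvRank_nonneg sl c
    have hnm := pvRank_nonneg sl m
    have htc := pvRank_le_two sl c
    have htm := pvRank_le_two sl m
    simp only [pvSel, pvA_loop1, pvA_loop2]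
    by_cases hlt : pvRank sl c < pvRank sl m
    · rw [if_pos hlt, ih c]
      by_cases hc0 : pvRank sl c = 0
      · have hm0 : ¬ pvRank sl m = 0 := by omega
        simp [hc0, h0.mp hc0, hm0]
      · by_cases hc1 : pvRank sl c ≤ 1
        · have hm0 : ¬ pvRank sl m = 0 := by omega
          have hm1 : ¬ pvRank sl m ≤ 1 := by omega
          have hceq : ¬ (PySem.Str.lower c == sl) = true := fun hb => hc0 (h0.mpr hb)
          simp [hc0, hc1, hceq, h1.mp hc1, hm0, hm1]
        · exact absurd hlt (by omega)
    · rw [if_neg hlt, ih m]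
      by_cases hm0 : pvRank sl m = 0
      · simp [hm0]
      · have hc0 : ¬ pvRank sl c = 0 := by omega
        have hceq : ¬ (PySem.Str.lower c == sl) = true := fun hb => hc0 (h0.mpr hb)
        by_cases hm1 : pvRank sl m ≤ 1
        · simp [hm0, hm1, hceq]
        · have hc1 : ¬ pvRank sl c ≤ 1 := by omega
          have hcin : ¬ PySem.Chars.isIn sl.toList (PySem.Chars.lower c.toList) = true :=
            fun hb => hc1 (h1.mpr hb)
          simp [hm0, hm1, hceq, hcin]

-- ===== VERDICT (by name: the statement is the Claim_ definition above) =====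
theorem primary_class_py_spec : Claim_equal_primary_class_py := by
  intro classes stem _
  unfold Spec_primary_class_py primary_class_py primary_class_py_alt
  cases classes with
  | nil => simp [pvA_loop1, pvA_loop2]
  | cons c rest =>
    generalize PySem.Str.replace (PySem.Str.lower stem) "_" "" = sl
    simp only [pvB_eq_sel, pvSel_char]
    have h0 := pvRank_eq_zero_iff sl c
    have h1 := pvRank_le_one_iff sl c
    have hnc := pvRank_nonneg sl c
    simp only [pvA_loop1, pvA_loop2]
    by_cases hc0 : pvRank sl c = 0
    · simp [hc0, h0.mp hc0]
    · have hceq : ¬ (PySem.Str.lower c == sl) = true := fun hb => hc0 (h0.mpr hb)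
      by_cases hc1 : pvRank sl c ≤ 1
      · simp [hc0, hc1, hceq, h1.mp hc1]
        cases pvA_loop1 sl rest <;> simp
      · have hcin : ¬ PySem.Chars.isIn sl.toList (PySem.Chars.lower c.toList) = true :=
          fun hb => hc1 (h1.mpr hb)
        simp [hc0, hc1, hceq, hcin]
        cases pvA_loop1 sl rest <;> cases pvA_loop2 sl rest <;> simp
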